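-- pv_equiv track=rewrite | github.com/pvestal/agentic-persona | echo-backend/services/style_morph_engine.py | _reduce_energy
-- ===== SOURCE A (Python) =====
-- def _reduce_energy(text: str) -> str:
--     """Reduce energy for more subdued communication"""
--     # Replace exclamation marks with periods
--     text = text.replace('!', '.')
--
--     # Remove overly energetic words
--     calm_replacements = {
--         'definitely': 'certainly',
--         'absolutely': 'yes',
--         'really': 'quite',
--         'totally': 'entirely',
--         'amazing': 'good',
--         'awesome': 'nice',
--         'fantastic': 'good'
--     }
--
--     for energetic, calm in calm_replacements.items():
--         text = text.replace(energetic, calm)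
--
--     return text
-- ===== SOURCE B (Python) =====
-- def _reduce_energy(text: str) -> str:
--     """Reduce energy for more subdued communication (single left-to-right pass)."""
--     rules = [
--         ('!', '.'),
--         ('definitely', 'certainly'),
--         ('absolutely', 'yes'),
--         ('really', 'quite'),
--         ('totally', 'entirely'),
--         ('amazing', 'good'),
--         ('awesome', 'nice'),
--         ('fantastic', 'good'),
--     ]
--     out = []
--     i = 0
--     n = len(text)
--     while i < n:
--         for k, v in rules:
--             if text.startswith(k, i):
--                 out.append(v)
--                 i += len(k)
--                 break
--         else:
--             out.append(text[i])
--             i += 1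
--     return ''.join(out)
-- ===== Notes on version B (the rewrite author's own statement) =====
-- stated objective: alternative
-- what changed: Replaces eight sequential whole-string replace passes by one left-to-right scan that applies the first matching rule at each position, so only occurrences present in the original text are rewritten.
-- intended difference: On texts containing 'fantastidefinitely', 'reallabsolutely', 'totallabsolutely' or 'awesomtotally', A's earlier pass glues its replacement value onto the preceding text and fabricates a new energetic word that a later pass rewrites again (e.g. A('reallabsolutely') = 'quitees'), while B rewrites only words actually present in the input ('reallyes'), which is the intended behaviour of the word-substitution table. — e.g. on _reduce_energy("reallabsolutely"): A returns "quitees", B returns "reallyes"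
import Mathlib
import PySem

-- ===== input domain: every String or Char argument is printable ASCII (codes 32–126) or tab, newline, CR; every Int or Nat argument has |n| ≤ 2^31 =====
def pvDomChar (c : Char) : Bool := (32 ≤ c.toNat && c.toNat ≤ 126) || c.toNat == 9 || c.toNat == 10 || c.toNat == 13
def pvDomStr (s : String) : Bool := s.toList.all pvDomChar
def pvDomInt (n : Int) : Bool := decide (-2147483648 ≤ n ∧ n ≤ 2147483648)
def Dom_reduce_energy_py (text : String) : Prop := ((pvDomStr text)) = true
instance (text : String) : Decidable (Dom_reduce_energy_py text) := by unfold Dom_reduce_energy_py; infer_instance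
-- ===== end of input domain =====

-- B replaces A's eight sequential whole-string replace passes by one left-to-right first-match
-- scan over a rule table (objective: alternative); on four exceptional substrings A's cascade
-- fabricates a new match and B intentionally differs (see D_reduce_energy_py).

-- ===== PORT A =====
-- literal transliteration: text.replace('!','.') then the seven word replacements in dict order
def reduce_energy_py (text : String) : String :=
  let t0 := PySem.Str.replace text "!" "."
  let t1 := PySem.Str.replace t0 "definitely" "certainly"
  let t2 := PySem.Str.replace t1 "absolutely" "yes"
  let t3 := PySem.Str.replace t2 "really" "quite"
  let t4 := PySem.Str.replace t3 "totally" "entirely"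
  let t5 := PySem.Str.replace t4 "amazing" "good"
  let t6 := PySem.Str.replace t5 "awesome" "nice"
  PySem.Str.replace t6 "fantastic" "good"

-- ===== PORT B =====
-- the rule table of Source B, in order
def pvRules : List (List Char × List Char) :=
  [("!".toList, ".".toList),
   ("definitely".toList, "certainly".toList),
   ("absolutely".toList, "yes".toList),
   ("really".toList, "quite".toList),
   ("totally".toList, "entirely".toList),
   ("amazing".toList, "good".toList),
   ("awesome".toList, "nice".toList),
   ("fantastic".toList, "good".toList)]

-- Source B's while-loop: at each position apply the first rule whose key starts here (the for/break
-- is `find?`), else copy the character; the loop runs at most len(text) times, which is the fuel.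
-- `i += len(k)` is the drop of the remaining `len(k) - 1` characters after the head.
def pvScanGo (rules : List (List Char × List Char)) : Nat → List Char → List Char
  | 0, l => l
  | _ + 1, [] => []
  | fuel + 1, c :: t =>
    match rules.find? (fun r => r.1.isPrefixOf (c :: t)) with
    | some r => r.2 ++ pvScanGo rules fuel (t.drop (r.1.length - 1))
    | none => c :: pvScanGo rules fuel t

def reduce_energy_py_alt (text : String) : String :=
  String.ofList (pvScanGo pvRules text.toList.length text.toList)

-- ===== PRECONDITION & SPEC =====
-- On texts containing 'fantastidefinitely', 'reallabsolutely', 'totallabsolutely' or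
-- 'awesomtotally', A's earlier pass glues its replacement value onto the preceding text and
-- fabricates a new energetic word that a later pass rewrites again (A 'reallabsolutely' =
-- 'quitees'), while B rewrites only words actually present in the input ('reallyes'),
-- which is the intended behaviour of the word-substitution table.
def D_reduce_energy_py (text : String) : Prop :=
  PySem.Str.isIn "fantastidefinitely" text = true ∨
  PySem.Str.isIn "reallabsolutely" text = true ∨
  PySem.Str.isIn "totallabsolutely" text = true ∨
  PySem.Str.isIn "awesomtotally" text = true
instance (text : String) : Decidable (D_reduce_energy_py text) := by
  unfold D_reduce_energy_py; infer_instance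

def Spec_reduce_energy_py (text : String) (out : String) : Prop :=
  ¬ D_reduce_energy_py text → out = reduce_energy_py_alt text
instance (text : String) (out : String) : Decidable (Spec_reduce_energy_py text out) := by
  unfold Spec_reduce_energy_py; infer_instance

def pvDiffWitness_reduce_energy_py : String := "reallabsolutely"
def pvDiffWitnessOut_reduce_energy_py : String × String := ("quitees", "reallyes")

-- ===== CLAIM (what is proved, stated in full; the proofs are below) =====
def Claim_unchanged_reduce_energy_py : Prop := ∀ (text : String), Dom_reduce_energy_py text → Spec_reduce_energy_py text (reduce_energy_py text)
def Claim_exact_reduce_energy_py : Prop := ∀ (text : String), Dom_reduce_energy_py text → D_reduce_energy_py text → reduce_energy_py text ≠ reduce_energy_py_alt text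
def Claim_changed_reduce_energy_py : Prop := Dom_reduce_energy_py (pvDiffWitness_reduce_energy_py) ∧ D_reduce_energy_py (pvDiffWitness_reduce_energy_py) ∧ reduce_energy_py (pvDiffWitness_reduce_energy_py) = pvDiffWitnessOut_reduce_energy_py.1 ∧ reduce_energy_py_alt (pvDiffWitness_reduce_energy_py) = pvDiffWitnessOut_reduce_energy_py.2 ∧ pvDiffWitnessOut_reduce_energy_py.1 ≠ pvDiffWitnessOut_reduce_energy_py.2

-- ===== LEMMAS AND PROOFS =====

-- `pvScan` is pvScanGo with exactly enough fuel (what reduce_energy_py_alt runs).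
def pvScan (rules : List (List Char × List Char)) (l : List Char) : List Char :=
  pvScanGo rules l.length l

lemma pvScanGo_congr (rules : List (List Char × List Char)) :
    ∀ (fuel fuel' : Nat) (l : List Char), l.length ≤ fuel → l.length ≤ fuel' →
      pvScanGo rules fuel l = pvScanGo rules fuel' l := by
  intro fuel
  induction fuel with
  | zero =>
    intro fuel' l h _
    have hl : l = [] := List.eq_nil_of_length_eq_zero (Nat.le_zero.mp h)
    subst hl
    cases fuel' <;> rfl
  | succ f ih =>
    intro fuel' l h h'
    cases l with
    | nil => cases fuel' <;> rfl
    | cons c t =>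
      cases fuel' with
      | zero => simp at h'
      | succ f' =>
        simp only [pvScanGo]
        cases hf : rules.find? (fun r => r.1.isPrefixOf (c :: t)) with
        | none =>
          simp only [List.length_cons] at h h'
          exact congrArg _ (ih f' t (by omega) (by omega))
        | some r =>
          simp only [List.length_cons] at h h'
          refine congrArg _ (ih f' (t.drop (r.1.length - 1)) ?_ ?_) <;>
            simp only [List.length_drop] <;> omega

lemma pvScan_cons_some {rules : List (List Char × List Char)} {c : Char} {t : List Char}
    {r : List Char × List Char}
    (h : rules.find? (fun r => r.1.isPrefixOf (c :: t)) = some r) :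
    pvScan rules (c :: t) = r.2 ++ pvScan rules (t.drop (r.1.length - 1)) := by
  show pvScanGo rules (t.length + 1) (c :: t) = _
  simp only [pvScanGo, h]
  refine congrArg _ (pvScanGo_congr rules t.length (t.drop (r.1.length - 1)).length _ ?_ le_rfl)
  simp only [List.length_drop]; omega

lemma pvScan_cons_none {rules : List (List Char × List Char)} {c : Char} {t : List Char}
    (h : rules.find? (fun r => r.1.isPrefixOf (c :: t)) = none) :
    pvScan rules (c :: t) = c :: pvScan rules t := by
  show pvScanGo rules (t.length + 1) (c :: t) = _
  simp only [pvScanGo, h]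
  rfl

lemma pvScan_rules_nil : ∀ l : List Char, pvScan [] l = l := by
  intro l
  induction l with
  | nil => rfl
  | cons c t ih => rw [pvScan_cons_none (by simp), ih]

-- clean recursive form of Python str.replace with a nonempty pattern
def pvRep (old new : List Char) : List Char → List Char
  | [] => []
  | c :: t =>
    if old.isPrefixOf (c :: t) then new ++ pvRep old new (t.drop (old.length - 1))
    else c :: pvRep old new t
termination_by l => l.length
decreasing_by
  all_goals (simp only [List.length_drop, List.length_cons]; omega)

lemma pvRep_go (old new : List Char) (h : old ≠ []) :
    ∀ (fuel : Nat) (l acc : List Char), l.length ≤ fuel →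
      PySem.Chars.replace.go old new fuel l acc = acc.reverse ++ pvRep old new l := by
  have hlen : 0 < old.length := List.length_pos_of_ne_nil h
  intro fuel
  induction fuel with
  | zero =>
    intro l acc hle
    have hl : l = [] := List.eq_nil_of_length_eq_zero (Nat.le_zero.mp hle)
    subst hl
    simp [PySem.Chars.replace.go, pvRep]
  | succ f ih =>
    intro l acc hle
    cases l with
    | nil => simp [PySem.Chars.replace.go, pvRep]
    | cons c t =>
      simp only [PySem.Chars.replace.go]
      by_cases hp : old.isPrefixOf (c :: t) = true
      · rw [if_pos hp]
        have hdl : ((c :: t).drop old.length).length ≤ f := by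
          simp only [List.length_drop, List.length_cons]
          simp only [List.length_cons] at hle
          omega
        rw [ih _ _ hdl]
        rw [pvRep, if_pos hp]
        have ho : old.length = (old.length - 1) + 1 := by omega
        rw [ho, List.drop_succ_cons]
        simp
      · rw [if_neg hp]
        rw [ih t (c :: acc) (by simpa using Nat.le_of_succ_le_succ hle)]
        rw [pvRep, if_neg hp]
        simp

lemma replace_eq_pvRep (s old new : List Char) (h : old ≠ []) :
    PySem.Chars.replace s old new = pvRep old new s := by
  unfold PySem.Chars.replace
  rw [if_neg (by simp [h])]
  simpa using pvRep_go old new h s.length s [] le_rfl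

lemma pvRep_append (old new : List Char) :
    ∀ (a t : List Char), (∀ p, p < a.length → ¬ old.isPrefixOf (a.drop p ++ t)) →
      pvRep old new (a ++ t) = a ++ pvRep old new t := by
  intro a
  induction a with
  | nil => intro t _; simp
  | cons c a' ih =>
    intro t hcond
    have h0 := hcond 0 (by simp)
    simp only [List.drop_zero, List.cons_append] at h0
    simp only [List.cons_append]
    rw [pvRep, if_neg h0]
    refine congrArg _ (ih t fun p hp => ?_)
    have := hcond (p + 1) (by simpa using Nat.succ_lt_succ hp)
    simpa using this

lemma pvScan_append (rules : List (List Char × List Char)) :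
    ∀ (a t : List Char),
      (∀ p, p < a.length → rules.find? (fun r => r.1.isPrefixOf (a.drop p ++ t)) = none) →
      pvScan rules (a ++ t) = a ++ pvScan rules t := by
  intro a
  induction a with
  | nil => intro t _; simp
  | cons c a' ih =>
    intro t hcond
    have h0 := hcond 0 (by simp)
    simp only [List.drop_zero, List.cons_append] at h0
    simp only [List.cons_append]
    rw [pvScan_cons_none h0]
    refine congrArg _ (ih t fun p hp => ?_)
    have := hcond (p + 1) (by simpa using Nat.succ_lt_succ hp)
    simpa using this

def pvBad : List (List Char) :=
  ["fantastidefinitely".toList, "reallabsolutely".toList,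
   "totallabsolutely".toList, "awesomtotally".toList]

def pvGood (l : List Char) : Prop := ∀ b ∈ pvBad, ¬ b <:+: l

lemma pvGood_of_suffix {s t : List Char} (h : t <:+ s) (hg : pvGood s) : pvGood t := by
  intro b hb hinf
  exact hg b hb (hinf.trans h.isInfix)

-- prefix-transfer: a proper tail of the key k that is a prefix of the scanned text either was a
-- prefix of the original text, or runs into the value of some rule that fired (a "creation").
lemma pvFT (R : List (List Char × List Char)) (k : List Char)
    (H4 : ∀ r ∈ R, ∀ q, q < k.length → 0 < q → ¬ (r.2 <+: k.drop q)) :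
    ∀ (t : List Char) (q : Nat), 0 < q → k.drop q <+: pvScan R t →
      k.drop q <+: t ∨
      ∃ q' r, r ∈ R ∧ q ≤ q' ∧ q' < k.length ∧
        ((k.drop q).take (q' - q) ++ r.1) <+: t ∧ k.drop q' <+: r.2 := by
  intro t
  induction t with
  | nil =>
    intro q _ hpre
    left
    exact hpre
  | cons ch t' ih =>
    intro q hq hpre
    by_cases hql : k.length ≤ q
    · left
      rw [List.drop_eq_nil_of_le hql]
      exact List.nil_prefix
    · push_neg at hql
      cases hf : R.find? (fun r => r.1.isPrefixOf (ch :: t')) with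
      | some r =>
        rw [pvScan_cons_some hf] at hpre
        rcases List.prefix_or_prefix_of_prefix hpre (List.prefix_append r.2 _) with hc | hc
        · right
          refine ⟨q, r, List.mem_of_find?_eq_some hf, le_rfl, hql, ?_, hc⟩
          simp only [Nat.sub_self, List.take_zero, List.nil_append]
          have hp : r.1.isPrefixOf (ch :: t') = true := by simpa using List.find?_some hf
          exact List.isPrefixOf_iff_prefix.mp hp
        · exact absurd hc (H4 r (List.mem_of_find?_eq_some hf) q hql hq)
      | none =>
        rw [pvScan_cons_none hf] at hpre
        rw [List.drop_eq_getElem_cons hql] at hpre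
        rw [List.cons_prefix_cons] at hpre
        obtain ⟨hch, htail⟩ := hpre
        by_cases hq1 : k.length ≤ q + 1
        · left
          have : k.drop (q + 1) = [] := List.drop_eq_nil_of_le hq1
          rw [List.drop_eq_getElem_cons hql, this, List.cons_prefix_cons]
          exact ⟨hch, List.nil_prefix⟩
        · push_neg at hq1
          rcases ih (q + 1) (by omega) htail with hl | ⟨q', r, hrm, hle, hlt, hpat, hv⟩
          · left
            rw [List.drop_eq_getElem_cons hql, List.cons_prefix_cons]
            exact ⟨hch, hl⟩
          · right
            refine ⟨q', r, hrm, by omega, hlt, ?_, hv⟩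
            rw [List.drop_eq_getElem_cons hql]
            have hsub : q' - q = (q' - (q + 1)) + 1 := by omega
            rw [hsub, List.take_succ_cons, List.cons_append, List.cons_prefix_cons]
            exact ⟨hch, hpat⟩

-- the cascade's exact single-scan semantics needs five COMPOSITE rules for the
-- creations (a replacement value gluing onto preceding text to form a later key)
def pvRulesE : List (List Char × List Char) := [("!".toList, ".".toList), ("definitely".toList, "certainly".toList), ("absolutely".toList, "yes".toList), ("really".toList, "quite".toList), ("reallabsolutely".toList, "quitees".toList), ("totally".toList, "entirely".toList), ("totallabsolutely".toList, "entirelyes".toList), ("amazing".toList, "good".toList), ("awesome".toList, "nice".toList), ("awesomtotally".toList, "nicentirely".toList), ("awesomtotallabsolutely".toList, "nicentirelyes".toList), ("fantastic".toList, "good".toList), ("fantastidefinitely".toList, "goodertainly".toList)]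

def pvCompsL : List (List Char × List Char) := [("reallabsolutely".toList, "quitees".toList), ("totallabsolutely".toList, "entirelyes".toList), ("awesomtotally".toList, "nicentirely".toList), ("awesomtotallabsolutely".toList, "nicentirelyes".toList), ("fantastidefinitely".toList, "goodertainly".toList)]

-- one pass of str.replace on the scan of the rules so far extends the scan by the base rule
-- and the composite rules born in this pass (valid on EVERY input)
lemma pvStepE (R COMPS : List (List Char × List Char)) (k v : List Char)
    (hk : k ≠ [])
    (H1 : ∀ r ∈ R, ∀ p, p < r.2.length → ¬ (k <+: r.2.drop p) ∧ ¬ (r.2.drop p <+: k))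
    (H2 : ∀ r ∈ R ++ (k, v) :: COMPS, ∀ p, p < k.length → 0 < p → ¬ (r.1 <+: k.drop p) ∧ ¬ (k.drop p <+: r.1))
    (H3 : ∀ r ∈ R, ∀ q', q' < k.length → 0 < q' → k.drop q' <+: r.2 →
        ∃ Co, Co ∈ COMPS ∧ Co.1 = k.take q' ++ r.1)
    (H4 : ∀ r ∈ R, ∀ q, q < k.length → 0 < q → ¬ (r.2 <+: k.drop q))
    (HC : ∀ Co ∈ COMPS, Co.1 ≠ [] ∧ ∀ Y : List Char,
        pvRep k v (pvScan R (Co.1 ++ Y)) = Co.2 ++ pvRep k v (pvScan R Y)) :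
    ∀ (n : Nat) (s : List Char), s.length ≤ n →
      pvRep k v (pvScan R s) = pvScan (R ++ (k, v) :: COMPS) s := by
  intro n
  induction n with
  | zero =>
    intro s hlen
    have hs : s = [] := List.eq_nil_of_length_eq_zero (Nat.le_zero.mp hlen)
    subst hs
    show pvRep k v [] = pvScan (R ++ (k, v) :: COMPS) []
    rw [pvRep]
    rfl
  | succ m ih =>
    intro s hlen
    cases s with
    | nil =>
      show pvRep k v [] = pvScan (R ++ (k, v) :: COMPS) []
      rw [pvRep]
      rfl
    | cons c t =>
      cases hf : R.find? (fun r => r.1.isPrefixOf (c :: t)) with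
      | some r =>
        have hf2 : (R ++ (k, v) :: COMPS).find? (fun r => r.1.isPrefixOf (c :: t)) = some r := by
          rw [List.find?_append, hf]; rfl
        rw [pvScan_cons_some hf, pvScan_cons_some hf2]
        have hrep : pvRep k v (r.2 ++ pvScan R (t.drop (r.1.length - 1)))
            = r.2 ++ pvRep k v (pvScan R (t.drop (r.1.length - 1))) := by
          apply pvRep_append
          intro p hp habs
          have hpre := List.isPrefixOf_iff_prefix.mp habs
          rcases List.prefix_or_prefix_of_prefix hpre (List.prefix_append _ _) with hc | hc
          · exact (H1 r (List.mem_of_find?_eq_some hf) p hp).1 hc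
          · exact (H1 r (List.mem_of_find?_eq_some hf) p hp).2 hc
        rw [hrep]
        refine congrArg _ (ih (t.drop (r.1.length - 1)) ?_)
        simp only [List.length_drop]
        simp only [List.length_cons] at hlen
        omega
      | none =>
        by_cases hkp : k.isPrefixOf (c :: t) = true
        · -- the new base rule fires at the head
          have hf2 : (R ++ (k, v) :: COMPS).find? (fun r => r.1.isPrefixOf (c :: t)) = some (k, v) := by
            rw [List.find?_append, hf]
            simp [hkp]
          obtain ⟨w, hw⟩ := List.isPrefixOf_iff_prefix.mp hkp
          have hscanA : pvScan R (c :: t) = k ++ pvScan R w := by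
            rw [← hw]
            apply pvScan_append
            intro p hp
            rcases Nat.eq_zero_or_pos p with rfl | hppos
            · simpa [hw] using hf
            · rw [List.find?_eq_none]
              intro r hr habs
              have hpre := List.isPrefixOf_iff_prefix.mp habs
              rcases List.prefix_or_prefix_of_prefix hpre (List.prefix_append _ _) with hc | hc
              · exact (H2 r (List.mem_append_left _ hr) p hp hppos).1 hc
              · exact (H2 r (List.mem_append_left _ hr) p hp hppos).2 hc
          have hwlen : w.length ≤ m := by
            have := congrArg List.length hw
            simp only [List.length_append, List.length_cons] at this
            simp only [List.length_cons] at hlen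
            have hkl : 0 < k.length := List.length_pos_of_ne_nil hk
            omega
          have hwdrop : t.drop (k.length - 1) = w := by
            have h1 : (c :: t).drop k.length = w := by
              rw [← hw, List.drop_left]
            have hkl : 0 < k.length := List.length_pos_of_ne_nil hk
            have h2 : t.drop (k.length - 1) = (c :: t).drop k.length := by
              conv_rhs => rw [show k.length = (k.length - 1) + 1 from by omega]
              rw [List.drop_succ_cons]
            rw [h2, h1]
          rw [pvScan_cons_some hf2, hscanA]
          obtain ⟨c0, k', rfl⟩ : ∃ c0 k', k = c0 :: k' := by
            cases k with
            | nil => exact absurd rfl hk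
            | cons a b => exact ⟨a, b, rfl⟩
          rw [List.cons_append, pvRep]
          rw [if_pos (by
            apply List.isPrefixOf_iff_prefix.mpr
            rw [List.cons_prefix_cons]
            exact ⟨rfl, List.prefix_append _ _⟩)]
          rw [show ((c0 :: k').length - 1) = k'.length from by simp, List.drop_left]
          rw [ih w hwlen]
          simp only [List.length_cons, Nat.add_sub_cancel] at hwdrop
          rw [hwdrop]
        · have hkpf : k.isPrefixOf (c :: t) = false := by rw [← Bool.not_eq_true]; exact hkp
          cases hfc : COMPS.find? (fun r => r.1.isPrefixOf (c :: t)) with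
          | some Co =>
            -- a composite rule born in this pass fires at the head
            have hCm := List.mem_of_find?_eq_some hfc
            have hCp : Co.1.isPrefixOf (c :: t) = true := by simpa using List.find?_some hfc
            obtain ⟨hCne, hHC⟩ := HC Co hCm
            have hf2 : (R ++ (k, v) :: COMPS).find? (fun r => r.1.isPrefixOf (c :: t)) = some Co := by
              rw [List.find?_append, hf, Option.none_or, List.find?_cons]
              simp only [hkpf]
              exact hfc
            obtain ⟨z, hz⟩ := List.isPrefixOf_iff_prefix.mp hCp
            have hzlen : z.length ≤ m := by
              have := congrArg List.length hz
              simp only [List.length_append, List.length_cons] at this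
              simp only [List.length_cons] at hlen
              have hkl : 0 < Co.1.length := List.length_pos_of_ne_nil hCne
              omega
            have hzdrop : t.drop (Co.1.length - 1) = z := by
              have h1 : (c :: t).drop Co.1.length = z := by
                rw [← hz, List.drop_left]
              have hkl : 0 < Co.1.length := List.length_pos_of_ne_nil hCne
              have h2 : t.drop (Co.1.length - 1) = (c :: t).drop Co.1.length := by
                conv_rhs => rw [show Co.1.length = (Co.1.length - 1) + 1 from by omega]
                rw [List.drop_succ_cons]
              rw [h2, h1]
            rw [pvScan_cons_some hf2, hzdrop, ← hz, hHC z, ih z hzlen]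
          | none =>
            have hf2 : (R ++ (k, v) :: COMPS).find? (fun r => r.1.isPrefixOf (c :: t)) = none := by
              rw [List.find?_append, hf, Option.none_or, List.find?_cons]
              simp only [hkpf]
              exact hfc
            rw [pvScan_cons_none hf, pvScan_cons_none hf2]
            have hnp : ¬ k.isPrefixOf (c :: pvScan R t) = true := by
              intro habs
              have hpre := List.isPrefixOf_iff_prefix.mp habs
              cases k with
              | nil => exact hk rfl
              | cons c0 k' =>
                rw [List.cons_prefix_cons] at hpre
                obtain ⟨rfl, htail⟩ := hpre
                by_cases hk'nil : k' = []
                · subst hk'nil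
                  exact hkp (List.isPrefixOf_iff_prefix.mpr
                    (List.cons_prefix_cons.mpr ⟨rfl, List.nil_prefix⟩))
                · rcases pvFT R (c0 :: k') H4 t 1 one_pos htail with hl | ⟨q', r, hrm, hle, hlt, hpat, hv⟩
                  · exact hkp (List.isPrefixOf_iff_prefix.mpr
                      (List.cons_prefix_cons.mpr ⟨rfl, hl⟩))
                  · obtain ⟨Co, hCm, hCkey⟩ := H3 r hrm q' hlt (by omega) hv
                    have hocc : ((c0 :: k').take q' ++ r.1) <+: c0 :: t := by
                      have hq' : q' = (q' - 1) + 1 := by omega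
                      rw [hq', List.take_succ_cons, List.cons_append, List.cons_prefix_cons]
                      exact ⟨rfl, by simpa using hpat⟩
                    have hmatch : Co.1.isPrefixOf (c0 :: t) = true := by
                      rw [hCkey]
                      exact List.isPrefixOf_iff_prefix.mpr hocc
                    exact absurd hmatch (by simpa using List.find?_eq_none.mp hfc Co hCm)
            rw [pvRep, if_neg hnp]
            refine congrArg _ (ih t ?_)
            simp only [List.length_cons] at hlen
            omega

lemma pvHC1 : ∀ Y : List Char,
    pvRep "really".toList "quite".toList (pvScan [("!".toList, ".".toList), ("definitely".toList, "certainly".toList), ("absolutely".toList, "yes".toList)] ("reallabsolutely".toList ++ Y))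
      = "quitees".toList ++ pvRep "really".toList "quite".toList (pvScan [("!".toList, ".".toList), ("definitely".toList, "certainly".toList), ("absolutely".toList, "yes".toList)] Y) := by
  intro Y
  have hL : pvScan [("!".toList, ".".toList), ("definitely".toList, "certainly".toList), ("absolutely".toList, "yes".toList)] ("reall".toList ++ ("absolutely".toList ++ Y))
      = "reall".toList ++ pvScan [("!".toList, ".".toList), ("definitely".toList, "certainly".toList), ("absolutely".toList, "yes".toList)] ("absolutely".toList ++ Y) := by
    apply pvScan_append
    intro p hp
    have hp' : p < 5 := by simpa using hp
    interval_cases p <;>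
      (rw [List.find?_eq_none]; intro r hr; fin_cases hr <;> simp [List.isPrefixOf])
  have hfind : List.find? (fun r => r.1.isPrefixOf ('a' :: ("bsolutely".toList ++ Y))) [("!".toList, ".".toList), ("definitely".toList, "certainly".toList), ("absolutely".toList, "yes".toList)]
      = some ("absolutely".toList, "yes".toList) := by
    simp [List.isPrefixOf]
  have hK : pvScan [("!".toList, ".".toList), ("definitely".toList, "certainly".toList), ("absolutely".toList, "yes".toList)] ("absolutely".toList ++ Y) = "yes".toList ++ pvScan [("!".toList, ".".toList), ("definitely".toList, "certainly".toList), ("absolutely".toList, "yes".toList)] Y := by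
    have h := pvScan_cons_some hfind
    simpa using h
  have hS : pvRep "really".toList "quite".toList ("es".toList ++ pvScan [("!".toList, ".".toList), ("definitely".toList, "certainly".toList), ("absolutely".toList, "yes".toList)] Y)
      = "es".toList ++ pvRep "really".toList "quite".toList (pvScan [("!".toList, ".".toList), ("definitely".toList, "certainly".toList), ("absolutely".toList, "yes".toList)] Y) := by
    apply pvRep_append
    intro p hp
    have hp' : p < 2 := by simpa using hp
    interval_cases p <;> simp [List.isPrefixOf]
  rw [show ("reallabsolutely".toList ++ Y) = "reall".toList ++ ("absolutely".toList ++ Y) from by simp, hL, hK]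
  rw [show "reall".toList ++ ("yes".toList ++ pvScan [("!".toList, ".".toList), ("definitely".toList, "certainly".toList), ("absolutely".toList, "yes".toList)] Y)
      = 'r' :: ("eally".toList ++ ("es".toList ++ pvScan [("!".toList, ".".toList), ("definitely".toList, "certainly".toList), ("absolutely".toList, "yes".toList)] Y)) from by simp]
  rw [pvRep, if_pos (by simp [List.isPrefixOf])]
  rw [show ("eally".toList ++ ("es".toList ++ pvScan [("!".toList, ".".toList), ("definitely".toList, "certainly".toList), ("absolutely".toList, "yes".toList)] Y)).drop ("really".toList.length - 1)
      = "es".toList ++ pvScan [("!".toList, ".".toList), ("definitely".toList, "certainly".toList), ("absolutely".toList, "yes".toList)] Y from by simp]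
  rw [hS]
  simp

lemma pvHC2 : ∀ Y : List Char,
    pvRep "totally".toList "entirely".toList (pvScan [("!".toList, ".".toList), ("definitely".toList, "certainly".toList), ("absolutely".toList, "yes".toList), ("really".toList, "quite".toList), ("reallabsolutely".toList, "quitees".toList)] ("totallabsolutely".toList ++ Y))
      = "entirelyes".toList ++ pvRep "totally".toList "entirely".toList (pvScan [("!".toList, ".".toList), ("definitely".toList, "certainly".toList), ("absolutely".toList, "yes".toList), ("really".toList, "quite".toList), ("reallabsolutely".toList, "quitees".toList)] Y) := by
  intro Y
  have hL : pvScan [("!".toList, ".".toList), ("definitely".toList, "certainly".toList), ("absolutely".toList, "yes".toList), ("really".toList, "quite".toList), ("reallabsolutely".toList, "quitees".toList)] ("totall".toList ++ ("absolutely".toList ++ Y))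
      = "totall".toList ++ pvScan [("!".toList, ".".toList), ("definitely".toList, "certainly".toList), ("absolutely".toList, "yes".toList), ("really".toList, "quite".toList), ("reallabsolutely".toList, "quitees".toList)] ("absolutely".toList ++ Y) := by
    apply pvScan_append
    intro p hp
    have hp' : p < 6 := by simpa using hp
    interval_cases p <;>
      (rw [List.find?_eq_none]; intro r hr; fin_cases hr <;> simp [List.isPrefixOf])
  have hfind : List.find? (fun r => r.1.isPrefixOf ('a' :: ("bsolutely".toList ++ Y))) [("!".toList, ".".toList), ("definitely".toList, "certainly".toList), ("absolutely".toList, "yes".toList), ("really".toList, "quite".toList), ("reallabsolutely".toList, "quitees".toList)]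
      = some ("absolutely".toList, "yes".toList) := by
    simp [List.isPrefixOf]
  have hK : pvScan [("!".toList, ".".toList), ("definitely".toList, "certainly".toList), ("absolutely".toList, "yes".toList), ("really".toList, "quite".toList), ("reallabsolutely".toList, "quitees".toList)] ("absolutely".toList ++ Y) = "yes".toList ++ pvScan [("!".toList, ".".toList), ("definitely".toList, "certainly".toList), ("absolutely".toList, "yes".toList), ("really".toList, "quite".toList), ("reallabsolutely".toList, "quitees".toList)] Y := by
    have h := pvScan_cons_some hfind
    simpa using h
  have hS : pvRep "totally".toList "entirely".toList ("es".toList ++ pvScan [("!".toList, ".".toList), ("definitely".toList, "certainly".toList), ("absolutely".toList, "yes".toList), ("really".toList, "quite".toList), ("reallabsolutely".toList, "quitees".toList)] Y)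
      = "es".toList ++ pvRep "totally".toList "entirely".toList (pvScan [("!".toList, ".".toList), ("definitely".toList, "certainly".toList), ("absolutely".toList, "yes".toList), ("really".toList, "quite".toList), ("reallabsolutely".toList, "quitees".toList)] Y) := by
    apply pvRep_append
    intro p hp
    have hp' : p < 2 := by simpa using hp
    interval_cases p <;> simp [List.isPrefixOf]
  rw [show ("totallabsolutely".toList ++ Y) = "totall".toList ++ ("absolutely".toList ++ Y) from by simp, hL, hK]
  rw [show "totall".toList ++ ("yes".toList ++ pvScan [("!".toList, ".".toList), ("definitely".toList, "certainly".toList), ("absolutely".toList, "yes".toList), ("really".toList, "quite".toList), ("reallabsolutely".toList, "quitees".toList)] Y)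
      = 't' :: ("otally".toList ++ ("es".toList ++ pvScan [("!".toList, ".".toList), ("definitely".toList, "certainly".toList), ("absolutely".toList, "yes".toList), ("really".toList, "quite".toList), ("reallabsolutely".toList, "quitees".toList)] Y)) from by simp]
  rw [pvRep, if_pos (by simp [List.isPrefixOf])]
  rw [show ("otally".toList ++ ("es".toList ++ pvScan [("!".toList, ".".toList), ("definitely".toList, "certainly".toList), ("absolutely".toList, "yes".toList), ("really".toList, "quite".toList), ("reallabsolutely".toList, "quitees".toList)] Y)).drop ("totally".toList.length - 1)
      = "es".toList ++ pvScan [("!".toList, ".".toList), ("definitely".toList, "certainly".toList), ("absolutely".toList, "yes".toList), ("really".toList, "quite".toList), ("reallabsolutely".toList, "quitees".toList)] Y from by simp]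
  rw [hS]
  simp

lemma pvHC3 : ∀ Y : List Char,
    pvRep "awesome".toList "nice".toList (pvScan [("!".toList, ".".toList), ("definitely".toList, "certainly".toList), ("absolutely".toList, "yes".toList), ("really".toList, "quite".toList), ("reallabsolutely".toList, "quitees".toList), ("totally".toList, "entirely".toList), ("totallabsolutely".toList, "entirelyes".toList), ("amazing".toList, "good".toList)] ("awesomtotally".toList ++ Y))
      = "nicentirely".toList ++ pvRep "awesome".toList "nice".toList (pvScan [("!".toList, ".".toList), ("definitely".toList, "certainly".toList), ("absolutely".toList, "yes".toList), ("really".toList, "quite".toList), ("reallabsolutely".toList, "quitees".toList), ("totally".toList, "entirely".toList), ("totallabsolutely".toList, "entirelyes".toList), ("amazing".toList, "good".toList)] Y) := by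
  intro Y
  have hL : pvScan [("!".toList, ".".toList), ("definitely".toList, "certainly".toList), ("absolutely".toList, "yes".toList), ("really".toList, "quite".toList), ("reallabsolutely".toList, "quitees".toList), ("totally".toList, "entirely".toList), ("totallabsolutely".toList, "entirelyes".toList), ("amazing".toList, "good".toList)] ("awesom".toList ++ ("totally".toList ++ Y))
      = "awesom".toList ++ pvScan [("!".toList, ".".toList), ("definitely".toList, "certainly".toList), ("absolutely".toList, "yes".toList), ("really".toList, "quite".toList), ("reallabsolutely".toList, "quitees".toList), ("totally".toList, "entirely".toList), ("totallabsolutely".toList, "entirelyes".toList), ("amazing".toList, "good".toList)] ("totally".toList ++ Y) := by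
    apply pvScan_append
    intro p hp
    have hp' : p < 6 := by simpa using hp
    interval_cases p <;>
      (rw [List.find?_eq_none]; intro r hr; fin_cases hr <;> simp [List.isPrefixOf])
  have hfind : List.find? (fun r => r.1.isPrefixOf ('t' :: ("otally".toList ++ Y))) [("!".toList, ".".toList), ("definitely".toList, "certainly".toList), ("absolutely".toList, "yes".toList), ("really".toList, "quite".toList), ("reallabsolutely".toList, "quitees".toList), ("totally".toList, "entirely".toList), ("totallabsolutely".toList, "entirelyes".toList), ("amazing".toList, "good".toList)]
      = some ("totally".toList, "entirely".toList) := by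
    simp [List.isPrefixOf]
  have hK : pvScan [("!".toList, ".".toList), ("definitely".toList, "certainly".toList), ("absolutely".toList, "yes".toList), ("really".toList, "quite".toList), ("reallabsolutely".toList, "quitees".toList), ("totally".toList, "entirely".toList), ("totallabsolutely".toList, "entirelyes".toList), ("amazing".toList, "good".toList)] ("totally".toList ++ Y) = "entirely".toList ++ pvScan [("!".toList, ".".toList), ("definitely".toList, "certainly".toList), ("absolutely".toList, "yes".toList), ("really".toList, "quite".toList), ("reallabsolutely".toList, "quitees".toList), ("totally".toList, "entirely".toList), ("totallabsolutely".toList, "entirelyes".toList), ("amazing".toList, "good".toList)] Y := by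
    have h := pvScan_cons_some hfind
    simpa using h
  have hS : pvRep "awesome".toList "nice".toList ("ntirely".toList ++ pvScan [("!".toList, ".".toList), ("definitely".toList, "certainly".toList), ("absolutely".toList, "yes".toList), ("really".toList, "quite".toList), ("reallabsolutely".toList, "quitees".toList), ("totally".toList, "entirely".toList), ("totallabsolutely".toList, "entirelyes".toList), ("amazing".toList, "good".toList)] Y)
      = "ntirely".toList ++ pvRep "awesome".toList "nice".toList (pvScan [("!".toList, ".".toList), ("definitely".toList, "certainly".toList), ("absolutely".toList, "yes".toList), ("really".toList, "quite".toList), ("reallabsolutely".toList, "quitees".toList), ("totally".toList, "entirely".toList), ("totallabsolutely".toList, "entirelyes".toList), ("amazing".toList, "good".toList)] Y) := by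
    apply pvRep_append
    intro p hp
    have hp' : p < 7 := by simpa using hp
    interval_cases p <;> simp [List.isPrefixOf]
  rw [show ("awesomtotally".toList ++ Y) = "awesom".toList ++ ("totally".toList ++ Y) from by simp, hL, hK]
  rw [show "awesom".toList ++ ("entirely".toList ++ pvScan [("!".toList, ".".toList), ("definitely".toList, "certainly".toList), ("absolutely".toList, "yes".toList), ("really".toList, "quite".toList), ("reallabsolutely".toList, "quitees".toList), ("totally".toList, "entirely".toList), ("totallabsolutely".toList, "entirelyes".toList), ("amazing".toList, "good".toList)] Y)
      = 'a' :: ("wesome".toList ++ ("ntirely".toList ++ pvScan [("!".toList, ".".toList), ("definitely".toList, "certainly".toList), ("absolutely".toList, "yes".toList), ("really".toList, "quite".toList), ("reallabsolutely".toList, "quitees".toList), ("totally".toList, "entirely".toList), ("totallabsolutely".toList, "entirelyes".toList), ("amazing".toList, "good".toList)] Y)) from by simp]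
  rw [pvRep, if_pos (by simp [List.isPrefixOf])]
  rw [show ("wesome".toList ++ ("ntirely".toList ++ pvScan [("!".toList, ".".toList), ("definitely".toList, "certainly".toList), ("absolutely".toList, "yes".toList), ("really".toList, "quite".toList), ("reallabsolutely".toList, "quitees".toList), ("totally".toList, "entirely".toList), ("totallabsolutely".toList, "entirelyes".toList), ("amazing".toList, "good".toList)] Y)).drop ("awesome".toList.length - 1)
      = "ntirely".toList ++ pvScan [("!".toList, ".".toList), ("definitely".toList, "certainly".toList), ("absolutely".toList, "yes".toList), ("really".toList, "quite".toList), ("reallabsolutely".toList, "quitees".toList), ("totally".toList, "entirely".toList), ("totallabsolutely".toList, "entirelyes".toList), ("amazing".toList, "good".toList)] Y from by simp]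
  rw [hS]
  simp

lemma pvHC4 : ∀ Y : List Char,
    pvRep "awesome".toList "nice".toList (pvScan [("!".toList, ".".toList), ("definitely".toList, "certainly".toList), ("absolutely".toList, "yes".toList), ("really".toList, "quite".toList), ("reallabsolutely".toList, "quitees".toList), ("totally".toList, "entirely".toList), ("totallabsolutely".toList, "entirelyes".toList), ("amazing".toList, "good".toList)] ("awesomtotallabsolutely".toList ++ Y))
      = "nicentirelyes".toList ++ pvRep "awesome".toList "nice".toList (pvScan [("!".toList, ".".toList), ("definitely".toList, "certainly".toList), ("absolutely".toList, "yes".toList), ("really".toList, "quite".toList), ("reallabsolutely".toList, "quitees".toList), ("totally".toList, "entirely".toList), ("totallabsolutely".toList, "entirelyes".toList), ("amazing".toList, "good".toList)] Y) := by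
  intro Y
  have hL : pvScan [("!".toList, ".".toList), ("definitely".toList, "certainly".toList), ("absolutely".toList, "yes".toList), ("really".toList, "quite".toList), ("reallabsolutely".toList, "quitees".toList), ("totally".toList, "entirely".toList), ("totallabsolutely".toList, "entirelyes".toList), ("amazing".toList, "good".toList)] ("awesom".toList ++ ("totallabsolutely".toList ++ Y))
      = "awesom".toList ++ pvScan [("!".toList, ".".toList), ("definitely".toList, "certainly".toList), ("absolutely".toList, "yes".toList), ("really".toList, "quite".toList), ("reallabsolutely".toList, "quitees".toList), ("totally".toList, "entirely".toList), ("totallabsolutely".toList, "entirelyes".toList), ("amazing".toList, "good".toList)] ("totallabsolutely".toList ++ Y) := by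
    apply pvScan_append
    intro p hp
    have hp' : p < 6 := by simpa using hp
    interval_cases p <;>
      (rw [List.find?_eq_none]; intro r hr; fin_cases hr <;> simp [List.isPrefixOf])
  have hfind : List.find? (fun r => r.1.isPrefixOf ('t' :: ("otallabsolutely".toList ++ Y))) [("!".toList, ".".toList), ("definitely".toList, "certainly".toList), ("absolutely".toList, "yes".toList), ("really".toList, "quite".toList), ("reallabsolutely".toList, "quitees".toList), ("totally".toList, "entirely".toList), ("totallabsolutely".toList, "entirelyes".toList), ("amazing".toList, "good".toList)]
      = some ("totallabsolutely".toList, "entirelyes".toList) := by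
    simp [List.isPrefixOf]
  have hK : pvScan [("!".toList, ".".toList), ("definitely".toList, "certainly".toList), ("absolutely".toList, "yes".toList), ("really".toList, "quite".toList), ("reallabsolutely".toList, "quitees".toList), ("totally".toList, "entirely".toList), ("totallabsolutely".toList, "entirelyes".toList), ("amazing".toList, "good".toList)] ("totallabsolutely".toList ++ Y) = "entirelyes".toList ++ pvScan [("!".toList, ".".toList), ("definitely".toList, "certainly".toList), ("absolutely".toList, "yes".toList), ("really".toList, "quite".toList), ("reallabsolutely".toList, "quitees".toList), ("totally".toList, "entirely".toList), ("totallabsolutely".toList, "entirelyes".toList), ("amazing".toList, "good".toList)] Y := by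
    have h := pvScan_cons_some hfind
    simpa using h
  have hS : pvRep "awesome".toList "nice".toList ("ntirelyes".toList ++ pvScan [("!".toList, ".".toList), ("definitely".toList, "certainly".toList), ("absolutely".toList, "yes".toList), ("really".toList, "quite".toList), ("reallabsolutely".toList, "quitees".toList), ("totally".toList, "entirely".toList), ("totallabsolutely".toList, "entirelyes".toList), ("amazing".toList, "good".toList)] Y)
      = "ntirelyes".toList ++ pvRep "awesome".toList "nice".toList (pvScan [("!".toList, ".".toList), ("definitely".toList, "certainly".toList), ("absolutely".toList, "yes".toList), ("really".toList, "quite".toList), ("reallabsolutely".toList, "quitees".toList), ("totally".toList, "entirely".toList), ("totallabsolutely".toList, "entirelyes".toList), ("amazing".toList, "good".toList)] Y) := by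
    apply pvRep_append
    intro p hp
    have hp' : p < 9 := by simpa using hp
    interval_cases p <;> simp [List.isPrefixOf]
  rw [show ("awesomtotallabsolutely".toList ++ Y) = "awesom".toList ++ ("totallabsolutely".toList ++ Y) from by simp, hL, hK]
  rw [show "awesom".toList ++ ("entirelyes".toList ++ pvScan [("!".toList, ".".toList), ("definitely".toList, "certainly".toList), ("absolutely".toList, "yes".toList), ("really".toList, "quite".toList), ("reallabsolutely".toList, "quitees".toList), ("totally".toList, "entirely".toList), ("totallabsolutely".toList, "entirelyes".toList), ("amazing".toList, "good".toList)] Y)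
      = 'a' :: ("wesome".toList ++ ("ntirelyes".toList ++ pvScan [("!".toList, ".".toList), ("definitely".toList, "certainly".toList), ("absolutely".toList, "yes".toList), ("really".toList, "quite".toList), ("reallabsolutely".toList, "quitees".toList), ("totally".toList, "entirely".toList), ("totallabsolutely".toList, "entirelyes".toList), ("amazing".toList, "good".toList)] Y)) from by simp]
  rw [pvRep, if_pos (by simp [List.isPrefixOf])]
  rw [show ("wesome".toList ++ ("ntirelyes".toList ++ pvScan [("!".toList, ".".toList), ("definitely".toList, "certainly".toList), ("absolutely".toList, "yes".toList), ("really".toList, "quite".toList), ("reallabsolutely".toList, "quitees".toList), ("totally".toList, "entirely".toList), ("totallabsolutely".toList, "entirelyes".toList), ("amazing".toList, "good".toList)] Y)).drop ("awesome".toList.length - 1)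
      = "ntirelyes".toList ++ pvScan [("!".toList, ".".toList), ("definitely".toList, "certainly".toList), ("absolutely".toList, "yes".toList), ("really".toList, "quite".toList), ("reallabsolutely".toList, "quitees".toList), ("totally".toList, "entirely".toList), ("totallabsolutely".toList, "entirelyes".toList), ("amazing".toList, "good".toList)] Y from by simp]
  rw [hS]
  simp

lemma pvHC5 : ∀ Y : List Char,
    pvRep "fantastic".toList "good".toList (pvScan [("!".toList, ".".toList), ("definitely".toList, "certainly".toList), ("absolutely".toList, "yes".toList), ("really".toList, "quite".toList), ("reallabsolutely".toList, "quitees".toList), ("totally".toList, "entirely".toList), ("totallabsolutely".toList, "entirelyes".toList), ("amazing".toList, "good".toList), ("awesome".toList, "nice".toList), ("awesomtotally".toList, "nicentirely".toList), ("awesomtotallabsolutely".toList, "nicentirelyes".toList)] ("fantastidefinitely".toList ++ Y))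
      = "goodertainly".toList ++ pvRep "fantastic".toList "good".toList (pvScan [("!".toList, ".".toList), ("definitely".toList, "certainly".toList), ("absolutely".toList, "yes".toList), ("really".toList, "quite".toList), ("reallabsolutely".toList, "quitees".toList), ("totally".toList, "entirely".toList), ("totallabsolutely".toList, "entirelyes".toList), ("amazing".toList, "good".toList), ("awesome".toList, "nice".toList), ("awesomtotally".toList, "nicentirely".toList), ("awesomtotallabsolutely".toList, "nicentirelyes".toList)] Y) := by
  intro Y
  have hL : pvScan [("!".toList, ".".toList), ("definitely".toList, "certainly".toList), ("absolutely".toList, "yes".toList), ("really".toList, "quite".toList), ("reallabsolutely".toList, "quitees".toList), ("totally".toList, "entirely".toList), ("totallabsolutely".toList, "entirelyes".toList), ("amazing".toList, "good".toList), ("awesome".toList, "nice".toList), ("awesomtotally".toList, "nicentirely".toList), ("awesomtotallabsolutely".toList, "nicentirelyes".toList)] ("fantasti".toList ++ ("definitely".toList ++ Y))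
      = "fantasti".toList ++ pvScan [("!".toList, ".".toList), ("definitely".toList, "certainly".toList), ("absolutely".toList, "yes".toList), ("really".toList, "quite".toList), ("reallabsolutely".toList, "quitees".toList), ("totally".toList, "entirely".toList), ("totallabsolutely".toList, "entirelyes".toList), ("amazing".toList, "good".toList), ("awesome".toList, "nice".toList), ("awesomtotally".toList, "nicentirely".toList), ("awesomtotallabsolutely".toList, "nicentirelyes".toList)] ("definitely".toList ++ Y) := by
    apply pvScan_append
    intro p hp
    have hp' : p < 8 := by simpa using hp
    interval_cases p <;>
      (rw [List.find?_eq_none]; intro r hr; fin_cases hr <;> simp [List.isPrefixOf])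
  have hfind : List.find? (fun r => r.1.isPrefixOf ('d' :: ("efinitely".toList ++ Y))) [("!".toList, ".".toList), ("definitely".toList, "certainly".toList), ("absolutely".toList, "yes".toList), ("really".toList, "quite".toList), ("reallabsolutely".toList, "quitees".toList), ("totally".toList, "entirely".toList), ("totallabsolutely".toList, "entirelyes".toList), ("amazing".toList, "good".toList), ("awesome".toList, "nice".toList), ("awesomtotally".toList, "nicentirely".toList), ("awesomtotallabsolutely".toList, "nicentirelyes".toList)]
      = some ("definitely".toList, "certainly".toList) := by
    simp [List.isPrefixOf]
  have hK : pvScan [("!".toList, ".".toList), ("definitely".toList, "certainly".toList), ("absolutely".toList, "yes".toList), ("really".toList, "quite".toList), ("reallabsolutely".toList, "quitees".toList), ("totally".toList, "entirely".toList), ("totallabsolutely".toList, "entirelyes".toList), ("amazing".toList, "good".toList), ("awesome".toList, "nice".toList), ("awesomtotally".toList, "nicentirely".toList), ("awesomtotallabsolutely".toList, "nicentirelyes".toList)] ("definitely".toList ++ Y) = "certainly".toList ++ pvScan [("!".toList, ".".toList), ("definitely".toList, "certainly".toList), ("absolutely".toList, "yes".toList), ("really".toList, "quite".toList), ("reallabsolutely".toList,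 "quitees".toList), ("totally".toList, "entirely".toList), ("totallabsolutely".toList, "entirelyes".toList), ("amazing".toList, "good".toList), ("awesome".toList, "nice".toList), ("awesomtotally".toList, "nicentirely".toList), ("awesomtotallabsolutely".toList, "nicentirelyes".toList)] Y := by
    have h := pvScan_cons_some hfind
    simpa using h
  have hS : pvRep "fantastic".toList "good".toList ("ertainly".toList ++ pvScan [("!".toList, ".".toList), ("definitely".toList, "certainly".toList), ("absolutely".toList, "yes".toList), ("really".toList, "quite".toList), ("reallabsolutely".toList, "quitees".toList), ("totally".toList, "entirely".toList), ("totallabsolutely".toList, "entirelyes".toList), ("amazing".toList, "good".toList), ("awesome".toList, "nice".toList), ("awesomtotally".toList, "nicentirely".toList), ("awesomtotallabsolutely".toList, "nicentirelyes".toList)] Y)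
      = "ertainly".toList ++ pvRep "fantastic".toList "good".toList (pvScan [("!".toList, ".".toList), ("definitely".toList, "certainly".toList), ("absolutely".toList, "yes".toList), ("really".toList, "quite".toList), ("reallabsolutely".toList, "quitees".toList), ("totally".toList, "entirely".toList), ("totallabsolutely".toList, "entirelyes".toList), ("amazing".toList, "good".toList), ("awesome".toList, "nice".toList), ("awesomtotally".toList, "nicentirely".toList), ("awesomtotallabsolutely".toList, "nicentirelyes".toList)] Y) := by
    apply pvRep_append
    intro p hp
    have hp' : p < 8 := by simpa using hp
    interval_cases p <;> simp [List.isPrefixOf]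
  rw [show ("fantastidefinitely".toList ++ Y) = "fantasti".toList ++ ("definitely".toList ++ Y) from by simp, hL, hK]
  rw [show "fantasti".toList ++ ("certainly".toList ++ pvScan [("!".toList, ".".toList), ("definitely".toList, "certainly".toList), ("absolutely".toList, "yes".toList), ("really".toList, "quite".toList), ("reallabsolutely".toList, "quitees".toList), ("totally".toList, "entirely".toList), ("totallabsolutely".toList, "entirelyes".toList), ("amazing".toList, "good".toList), ("awesome".toList, "nice".toList), ("awesomtotally".toList, "nicentirely".toList), ("awesomtotallabsolutely".toList, "nicentirelyes".toList)] Y)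
      = 'f' :: ("antastic".toList ++ ("ertainly".toList ++ pvScan [("!".toList, ".".toList), ("definitely".toList, "certainly".toList), ("absolutely".toList, "yes".toList), ("really".toList, "quite".toList), ("reallabsolutely".toList, "quitees".toList), ("totally".toList, "entirely".toList), ("totallabsolutely".toList, "entirelyes".toList), ("amazing".toList, "good".toList), ("awesome".toList, "nice".toList), ("awesomtotally".toList, "nicentirely".toList), ("awesomtotallabsolutely".toList, "nicentirelyes".toList)] Y)) from by simp]
  rw [pvRep, if_pos (by simp [List.isPrefixOf])]
  rw [show ("antastic".toList ++ ("ertainly".toList ++ pvScan [("!".toList, ".".toList), ("definitely".toList, "certainly".toList), ("absolutely".toList, "yes".toList), ("really".toList, "quite".toList), ("reallabsolutely".toList, "quitees".toList), ("totally".toList, "entirely".toList), ("totallabsolutely".toList, "entirelyes".toList), ("amazing".toList, "good".toList), ("awesome".toList, "nice".toList), ("awesomtotally".toList, "nicentirely".toList), ("awesomtotallabsolutely".toList, "nicentirelyes".toList)] Y)).drop ("fantastic".toList.length - 1)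
      = "ertainly".toList ++ pvScan [("!".toList, ".".toList), ("definitely".toList, "certainly".toList), ("absolutely".toList, "yes".toList), ("really".toList, "quite".toList), ("reallabsolutely".toList, "quitees".toList), ("totally".toList, "entirely".toList), ("totallabsolutely".toList, "entirelyes".toList), ("amazing".toList, "good".toList), ("awesome".toList, "nice".toList), ("awesomtotally".toList, "nicentirely".toList), ("awesomtotallabsolutely".toList, "nicentirelyes".toList)] Y from by simp]
  rw [hS]
  simp

lemma pvChainE (s : List Char) :
    pvRep "fantastic".toList "good".toList
      (pvRep "awesome".toList "nice".toList
        (pvRep "amazing".toList "good".toList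
          (pvRep "totally".toList "entirely".toList
            (pvRep "really".toList "quite".toList
              (pvRep "absolutely".toList "yes".toList
                (pvRep "definitely".toList "certainly".toList
                  (pvRep "!".toList ".".toList s))))))) = pvScan pvRulesE s := by
  have e0 : pvRep "!".toList ".".toList s
      = pvScan [("!".toList, ".".toList)] s := by
    conv_lhs => rw [← pvScan_rules_nil s]
    exact pvStepE [] [] "!".toList ".".toList (by decide) (by decide) (by decide) (by decide)
      (by decide) (by intro Co hCo; simp at hCo) s.length s le_rfl
  rw [e0]
  rw [pvStepE [("!".toList, ".".toList)]
      [] "definitely".toList "certainly".toList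
      (by decide) (by decide) (by decide) (by decide) (by decide)
      (by intro Co hCo; simp at hCo) s.length s le_rfl]
  simp only [List.cons_append, List.nil_append]
  rw [pvStepE [("!".toList, ".".toList), ("definitely".toList, "certainly".toList)]
      [] "absolutely".toList "yes".toList
      (by decide) (by decide) (by decide) (by decide) (by decide)
      (by intro Co hCo; simp at hCo) s.length s le_rfl]
  simp only [List.cons_append, List.nil_append]
  rw [pvStepE [("!".toList, ".".toList), ("definitely".toList, "certainly".toList), ("absolutely".toList, "yes".toList)]
      [("reallabsolutely".toList, "quitees".toList)] "really".toList "quite".toList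
      (by decide) (by decide) (by decide) (by decide) (by decide)
      (by intro Co hCo; simp only [List.mem_cons, List.not_mem_nil, or_false] at hCo; subst hCo; exact ⟨by decide, pvHC1⟩) s.length s le_rfl]
  simp only [List.cons_append, List.nil_append]
  rw [pvStepE [("!".toList, ".".toList), ("definitely".toList, "certainly".toList), ("absolutely".toList, "yes".toList), ("really".toList, "quite".toList), ("reallabsolutely".toList, "quitees".toList)]
      [("totallabsolutely".toList, "entirelyes".toList)] "totally".toList "entirely".toList
      (by decide) (by decide) (by decide) (by decide) (by decide)
      (by intro Co hCo; simp only [List.mem_cons, List.not_mem_nil, or_false] at hCo; subst hCo; exact ⟨by decide, pvHC2⟩) s.length s le_rfl]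
  simp only [List.cons_append, List.nil_append]
  rw [pvStepE [("!".toList, ".".toList), ("definitely".toList, "certainly".toList), ("absolutely".toList, "yes".toList), ("really".toList, "quite".toList), ("reallabsolutely".toList, "quitees".toList), ("totally".toList, "entirely".toList), ("totallabsolutely".toList, "entirelyes".toList)]
      [] "amazing".toList "good".toList
      (by decide) (by decide) (by decide) (by decide) (by decide)
      (by intro Co hCo; simp at hCo) s.length s le_rfl]
  simp only [List.cons_append, List.nil_append]
  rw [pvStepE [("!".toList, ".".toList), ("definitely".toList, "certainly".toList), ("absolutely".toList, "yes".toList), ("really".toList, "quite".toList), ("reallabsolutely".toList, "quitees".toList), ("totally".toList, "entirely".toList), ("totallabsolutely".toList, "entirelyes".toList), ("amazing".toList, "good".toList)]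
      [("awesomtotally".toList, "nicentirely".toList), ("awesomtotallabsolutely".toList, "nicentirelyes".toList)] "awesome".toList "nice".toList
      (by decide) (by decide) (by decide) (by decide) (by decide)
      (by intro Co hCo; simp only [List.mem_cons, List.not_mem_nil, or_false] at hCo
          rcases hCo with rfl | rfl
          · exact ⟨by decide, pvHC3⟩
          · exact ⟨by decide, pvHC4⟩) s.length s le_rfl]
  simp only [List.cons_append, List.nil_append]
  rw [pvStepE [("!".toList, ".".toList), ("definitely".toList, "certainly".toList), ("absolutely".toList, "yes".toList), ("really".toList, "quite".toList), ("reallabsolutely".toList, "quitees".toList), ("totally".toList, "entirely".toList), ("totallabsolutely".toList, "entirelyes".toList), ("amazing".toList, "good".toList), ("awesome".toList, "nice".toList), ("awesomtotally".toList, "nicentirely".toList), ("awesomtotallabsolutely".toList, "nicentirelyes".toList)]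
      [("fantastidefinitely".toList, "goodertainly".toList)] "fantastic".toList "good".toList
      (by decide) (by decide) (by decide) (by decide) (by decide)
      (by intro Co hCo; simp only [List.mem_cons, List.not_mem_nil, or_false] at hCo; subst hCo; exact ⟨by decide, pvHC5⟩) s.length s le_rfl]
  simp only [List.cons_append, List.nil_append]
  rfl

lemma pvFindCorr (c : Char) (t : List Char)
    (hAll : ∀ Co ∈ pvCompsL, Co.1.isPrefixOf (c :: t) = false) :
    pvRulesE.find? (fun r => r.1.isPrefixOf (c :: t))
      = pvRules.find? (fun r => r.1.isPrefixOf (c :: t)) := by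
  have h1 := hAll ("reallabsolutely".toList, "quitees".toList) (by simp [pvCompsL])
  have h2 := hAll ("totallabsolutely".toList, "entirelyes".toList) (by simp [pvCompsL])
  have h3 := hAll ("awesomtotally".toList, "nicentirely".toList) (by simp [pvCompsL])
  have h4 := hAll ("awesomtotallabsolutely".toList, "nicentirelyes".toList) (by simp [pvCompsL])
  have h5 := hAll ("fantastidefinitely".toList, "goodertainly".toList) (by simp [pvCompsL])
  simp only at h1 h2 h3 h4 h5
  simp only [pvRulesE, pvRules, List.find?_cons]
  simp only [h1, h2, h3, h4, h5]

lemma pvSync : ∀ (n : Nat) (s : List Char), s.length ≤ n → pvGood s →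
    pvScan pvRulesE s = pvScan pvRules s := by
  intro n
  induction n with
  | zero =>
    intro s hlen _
    have hs : s = [] := List.eq_nil_of_length_eq_zero (Nat.le_zero.mp hlen)
    subst hs
    rfl
  | succ m ih =>
    intro s hlen hgood
    cases s with
    | nil => rfl
    | cons c t =>
      have hAll : ∀ Co ∈ pvCompsL, Co.1.isPrefixOf (c :: t) = false := by
        intro Co hCo
        by_contra hx
        have hx' : Co.1.isPrefixOf (c :: t) = true := by simpa using hx
        have hpre := List.isPrefixOf_iff_prefix.mp hx'
        have hbadin : ∃ b ∈ pvBad, b <:+: Co.1 := by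
          fin_cases hCo <;> decide
        obtain ⟨b, hb, hbin⟩ := hbadin
        exact hgood b hb (hbin.trans hpre.isInfix)
      have hcorr := pvFindCorr c t hAll
      cases hf : pvRules.find? (fun r => r.1.isPrefixOf (c :: t)) with
      | some r =>
        rw [pvScan_cons_some (hcorr.trans hf), pvScan_cons_some hf]
        refine congrArg _ (ih (t.drop (r.1.length - 1)) ?_ ?_)
        · simp only [List.length_drop]
          simp only [List.length_cons] at hlen
          omega
        · exact pvGood_of_suffix ((List.drop_suffix _ _).trans (List.suffix_cons c t)) hgood
      | none =>
        rw [pvScan_cons_none (hcorr.trans hf), pvScan_cons_none hf]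
        exact congrArg _ (ih t (by simp only [List.length_cons] at hlen; omega)
          (pvGood_of_suffix (List.suffix_cons c t) hgood))

-- a pattern occurrence not at the head survives a scan step of the base rules
lemma pvBadKeep (r : List Char × List Char) (hrP : r ∈ pvRules) (c : Char) (t b : List Char)
    (hb : b ∈ pvBad) (hpre : r.1 <+: (c :: t)) (u w : List Char) (hu : u ≠ [])
    (hsplit : u ++ b ++ w = c :: t) : b <:+: t.drop (r.1.length - 1) := by
  have hsplit' : u ++ (b ++ w) = c :: t := by rw [← List.append_assoc]; exact hsplit
  have hposlen : 0 < r.1.length := by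
    have : ∀ x ∈ pvRules, 0 < x.1.length := by decide
    exact this r hrP
  by_cases hlen : r.1.length ≤ u.length
  · have ht : t.drop (r.1.length - 1) = (c :: t).drop r.1.length := by
      conv_rhs => rw [show r.1.length = (r.1.length - 1) + 1 from by omega]
      rw [List.drop_succ_cons]
    rw [ht, ← hsplit', List.drop_append_of_le_length hlen]
    exact ⟨u.drop r.1.length, w, by rw [← List.append_assoc]⟩
  · exfalso
    push_neg at hlen
    have hupre : u <+: c :: t := ⟨b ++ w, hsplit'⟩
    rcases List.prefix_or_prefix_of_prefix hupre hpre with hc1 | hc1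
    · obtain ⟨d, hd⟩ := hc1
      have hdval : d = r.1.drop u.length := by rw [← hd, List.drop_left]
      have hdpre : d <+: b ++ w := by
        have hx : u ++ d <+: u ++ (b ++ w) := by
          rw [hd, hsplit']
          exact hpre
        exact (List.prefix_append_right_inj u).mp hx
      rcases List.prefix_or_prefix_of_prefix hdpre (List.prefix_append b w) with hc2 | hc2
      · have hrefute : ¬ (r.1.drop u.length <+: b) := by
          have hDFT : ∀ x ∈ pvRules, ∀ m, m < x.1.length → 0 < m →
              ∀ y ∈ pvBad, ¬ (x.1.drop m <+: y) := by decide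
          exact hDFT r hrP u.length hlen (List.length_pos_of_ne_nil hu) b hb
        exact hrefute (hdval ▸ hc2)
      · have hblen : 13 ≤ b.length := by
          have : ∀ y ∈ pvBad, 13 ≤ y.length := by decide
          exact this b hb
        have hrlen : r.1.length ≤ 10 := by
          have : ∀ x ∈ pvRules, x.1.length ≤ 10 := by decide
          exact this r hrP
        have hle := hc2.length_le
        have hdlen : d.length = r.1.length - u.length := by rw [hdval]; simp
        omega
    · have := hc1.length_le
      omega

lemma pvGoodNil : pvGood [] := by
  intro b hb hinf
  have h1 : b.length ≤ 0 := by simpa using hinf.length_le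
  have h2 : 13 ≤ b.length := by
    have : ∀ y ∈ pvBad, 13 ≤ y.length := by decide
    exact this b hb
  omega

lemma pvTight : ∀ (n : Nat) (s : List Char), s.length ≤ n → ¬ pvGood s →
    pvScan pvRulesE s ≠ pvScan pvRules s := by
  intro n
  induction n with
  | zero =>
    intro s hlen hbad
    have hs : s = [] := List.eq_nil_of_length_eq_zero (Nat.le_zero.mp hlen)
    subst hs
    exact absurd pvGoodNil hbad
  | succ m ih =>
    intro s hlen hbad
    cases s with
    | nil => exact absurd pvGoodNil hbad
    | cons c t =>
      obtain ⟨b, hb, hbinf⟩ : ∃ b ∈ pvBad, b <:+: (c :: t) := by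
        unfold pvGood at hbad
        push_neg at hbad
        exact hbad
      cases hfc : pvCompsL.find? (fun Co => Co.1.isPrefixOf (c :: t)) with
      | some Co =>
        have hCm := List.mem_of_find?_eq_some hfc
        have hCp : Co.1.isPrefixOf (c :: t) = true := by simpa using List.find?_some hfc
        simp only [pvCompsL, List.mem_cons, List.not_mem_nil, or_false] at hCm
        rcases hCm with rfl | rfl | rfl | rfl | rfl
        · obtain ⟨z, hz⟩ := List.isPrefixOf_iff_prefix.mp hCp
          have hfE : pvRulesE.find? (fun r => r.1.isPrefixOf (c :: t))
              = some ("reallabsolutely".toList, "quitees".toList) := by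
            rw [← hz]; simp [pvRulesE, List.isPrefixOf]
          have hfB : pvRules.find? (fun r => r.1.isPrefixOf (c :: t)) = none := by
            rw [← hz]; simp [pvRules, List.isPrefixOf]
          have hc : c = 'r' := by
            have := congrArg (fun l => l.headD 'x') hz
            simpa using this.symm
          subst hc
          rw [pvScan_cons_some hfE, pvScan_cons_none hfB]
          intro h
          have := congrArg (fun l => l.headD 'x') h
          simp at this
        · obtain ⟨z, hz⟩ := List.isPrefixOf_iff_prefix.mp hCp
          have hfE : pvRulesE.find? (fun r => r.1.isPrefixOf (c :: t))
              = some ("totallabsolutely".toList, "entirelyes".toList) := by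
            rw [← hz]; simp [pvRulesE, List.isPrefixOf]
          have hfB : pvRules.find? (fun r => r.1.isPrefixOf (c :: t)) = none := by
            rw [← hz]; simp [pvRules, List.isPrefixOf]
          have hc : c = 't' := by
            have := congrArg (fun l => l.headD 'x') hz
            simpa using this.symm
          subst hc
          rw [pvScan_cons_some hfE, pvScan_cons_none hfB]
          intro h
          have := congrArg (fun l => l.headD 'x') h
          simp at this
        · obtain ⟨z, hz⟩ := List.isPrefixOf_iff_prefix.mp hCp
          have hfE : pvRulesE.find? (fun r => r.1.isPrefixOf (c :: t))
              = some ("awesomtotally".toList, "nicentirely".toList) := by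
            rw [← hz]; simp [pvRulesE, List.isPrefixOf]
          have hfB : pvRules.find? (fun r => r.1.isPrefixOf (c :: t)) = none := by
            rw [← hz]; simp [pvRules, List.isPrefixOf]
          have hc : c = 'a' := by
            have := congrArg (fun l => l.headD 'x') hz
            simpa using this.symm
          subst hc
          rw [pvScan_cons_some hfE, pvScan_cons_none hfB]
          intro h
          have := congrArg (fun l => l.headD 'x') h
          simp at this
        · obtain ⟨z, hz⟩ := List.isPrefixOf_iff_prefix.mp hCp
          have hfE : pvRulesE.find? (fun r => r.1.isPrefixOf (c :: t))
              = some ("awesomtotallabsolutely".toList, "nicentirelyes".toList) := by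
            rw [← hz]; simp [pvRulesE, List.isPrefixOf]
          have hfB : pvRules.find? (fun r => r.1.isPrefixOf (c :: t)) = none := by
            rw [← hz]; simp [pvRules, List.isPrefixOf]
          have hc : c = 'a' := by
            have := congrArg (fun l => l.headD 'x') hz
            simpa using this.symm
          subst hc
          rw [pvScan_cons_some hfE, pvScan_cons_none hfB]
          intro h
          have := congrArg (fun l => l.headD 'x') h
          simp at this
        · obtain ⟨z, hz⟩ := List.isPrefixOf_iff_prefix.mp hCp
          have hfE : pvRulesE.find? (fun r => r.1.isPrefixOf (c :: t))
              = some ("fantastidefinitely".toList, "goodertainly".toList) := by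
            rw [← hz]; simp [pvRulesE, List.isPrefixOf]
          have hfB : pvRules.find? (fun r => r.1.isPrefixOf (c :: t)) = none := by
            rw [← hz]; simp [pvRules, List.isPrefixOf]
          have hc : c = 'f' := by
            have := congrArg (fun l => l.headD 'x') hz
            simpa using this.symm
          subst hc
          rw [pvScan_cons_some hfE, pvScan_cons_none hfB]
          intro h
          have := congrArg (fun l => l.headD 'x') h
          simp at this
      | none =>
        have hAll : ∀ Co ∈ pvCompsL, Co.1.isPrefixOf (c :: t) = false := by
          intro Co hCo
          rw [← Bool.not_eq_true]
          exact List.find?_eq_none.mp hfc Co hCo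
        have hcorr := pvFindCorr c t hAll
        obtain ⟨u, w, hsplit⟩ := hbinf
        have hu : u ≠ [] := by
          intro hnil
          subst hnil
          have hbpre : b <+: c :: t := ⟨w, by simpa using hsplit⟩
          have hbP : b.isPrefixOf (c :: t) = true := List.isPrefixOf_iff_prefix.mpr hbpre
          simp only [pvBad, List.mem_cons, List.not_mem_nil, or_false] at hb
          rcases hb with rfl | rfl | rfl | rfl
          · have hx := hAll ("fantastidefinitely".toList, "goodertainly".toList) (by simp [pvCompsL])
            simp only at hx
            exact absurd hbP (by rw [hx]; decide)
          · have hx := hAll ("reallabsolutely".toList, "quitees".toList) (by simp [pvCompsL])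
            simp only at hx
            exact absurd hbP (by rw [hx]; decide)
          · have hx := hAll ("totallabsolutely".toList, "entirelyes".toList) (by simp [pvCompsL])
            simp only at hx
            exact absurd hbP (by rw [hx]; decide)
          · have hx := hAll ("awesomtotally".toList, "nicentirely".toList) (by simp [pvCompsL])
            simp only at hx
            exact absurd hbP (by rw [hx]; decide)
        cases hf : pvRules.find? (fun r => r.1.isPrefixOf (c :: t)) with
        | some r =>
          rw [pvScan_cons_some (hcorr.trans hf), pvScan_cons_some hf]
          intro heq
          have heq' := List.append_cancel_left heq
          have hkeep : b <:+: t.drop (r.1.length - 1) :=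
            pvBadKeep r (List.mem_of_find?_eq_some hf) c t b hb
              (List.isPrefixOf_iff_prefix.mp (by simpa using List.find?_some hf)) u w hu hsplit
          refine ih (t.drop (r.1.length - 1)) ?_ ?_ heq'
          · simp only [List.length_drop]
            simp only [List.length_cons] at hlen
            omega
          · intro hg
            exact hg b hb hkeep
        | none =>
          rw [pvScan_cons_none (hcorr.trans hf), pvScan_cons_none hf]
          intro heq
          have heq' : pvScan pvRulesE t = pvScan pvRules t := by
            injection heq
          obtain ⟨cu, u', rfl⟩ : ∃ cu u', u = cu :: u' := by
            cases u with
            | nil => exact absurd rfl hu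
            | cons a l => exact ⟨a, l, rfl⟩
          have htsplit : u' ++ b ++ w = t := by
            have := hsplit
            simp only [List.cons_append] at this
            exact (List.cons.injEq .. ▸ this).2
          refine ih t (by simp only [List.length_cons] at hlen; omega) ?_ heq'
          intro hg
          exact hg b hb ⟨u', w, htsplit⟩

lemma pvGood_of_notD (text : String) (h : ¬ D_reduce_energy_py text) : pvGood text.toList := by
  intro b hb hinf
  apply h
  unfold D_reduce_energy_py
  simp only [pvBad, List.mem_cons, List.not_mem_nil, or_false] at hb
  rcases hb with rfl | rfl | rfl | rfl
  · exact Or.inl ((PySem.Str.isIn_iff_infix _ _).mpr hinf)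
  · exact Or.inr (Or.inl ((PySem.Str.isIn_iff_infix _ _).mpr hinf))
  · exact Or.inr (Or.inr (Or.inl ((PySem.Str.isIn_iff_infix _ _).mpr hinf)))
  · exact Or.inr (Or.inr (Or.inr ((PySem.Str.isIn_iff_infix _ _).mpr hinf)))

-- ===== VERDICT (by name: the statement is the Claim_ definition above) =====
theorem reduce_energy_py_spec : Claim_unchanged_reduce_energy_py := by
  intro text _ hnD
  have hg := pvGood_of_notD text hnD
  apply String.toList_inj.mp
  simp only [reduce_energy_py, reduce_energy_py_alt, PySem.Str.toList_replace,
    String.toList_ofList]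
  rw [replace_eq_pvRep _ _ _ (by decide), replace_eq_pvRep _ _ _ (by decide),
    replace_eq_pvRep _ _ _ (by decide), replace_eq_pvRep _ _ _ (by decide),
    replace_eq_pvRep _ _ _ (by decide), replace_eq_pvRep _ _ _ (by decide),
    replace_eq_pvRep _ _ _ (by decide), replace_eq_pvRep _ _ _ (by decide)]
  rw [pvChainE text.toList]
  exact pvSync text.toList.length text.toList le_rfl hg

theorem reduce_energy_py_changed : Claim_changed_reduce_energy_py := by
  unfold Claim_changed_reduce_energy_py; decide

theorem reduce_energy_py_tight : Claim_exact_reduce_energy_py := by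
  intro text _ hD habs
  have hbadL : ¬ pvGood text.toList := by
    intro hg
    rcases hD with h | h | h | h <;>
      exact hg _ (by simp [pvBad]) ((PySem.Str.isIn_iff_infix _ _).mp h)
  have heq := congrArg String.toList habs
  simp only [reduce_energy_py, reduce_energy_py_alt, PySem.Str.toList_replace,
    String.toList_ofList] at heq
  rw [replace_eq_pvRep _ _ _ (by decide), replace_eq_pvRep _ _ _ (by decide),
    replace_eq_pvRep _ _ _ (by decide), replace_eq_pvRep _ _ _ (by decide),
    replace_eq_pvRep _ _ _ (by decide), replace_eq_pvRep _ _ _ (by decide),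
    replace_eq_pvRep _ _ _ (by decide), replace_eq_pvRep _ _ _ (by decide),
    pvChainE text.toList] at heq
  exact pvTight text.toList.length text.toList le_rfl hbadL heq
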